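-- pv_equiv track=rewrite | github.com/JonasUJ/APS-problem | bugfixing examgaming/generators/example.py | generate_unique_names
-- ===== SOURCE A (Python) =====
-- import string
-- from itertools import product, islice
--
-- def generate_unique_names(n, prefix="k", max_len=100):
--     """Generate `n` unique lowercase names with prefix, within max_len."""
--     usable_len = max_len - len(prefix)
--     charset = string.ascii_lowercase
--
--     count = 0
--     for length in range(1, usable_len + 1):
--         for suffix in product(charset, repeat=length):
--             yield prefix + ''.join(suffix)
--             count += 1
--             if count >= n:
--                 return
-- ===== SOURCE B (Python) =====
-- def generate_unique_names(n, prefix="k", max_len=100):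
--     """Generate `n` unique lowercase names with prefix, within max_len."""
--     usable_len = max_len - len(prefix)
--     count = 0
--     i = 0
--     while True:
--         # bijective base-26 decode of ordinal i into a lowercase suffix
--         j = i
--         suffix = ""
--         while True:
--             suffix = chr(97 + j % 26) + suffix
--             j = j // 26 - 1
--             if j < 0:
--                 break
--         if len(suffix) > usable_len:
--             return
--         yield prefix + suffix
--         count += 1
--         if count >= n:
--             return
--         i += 1
-- ===== Notes on version B (the rewrite author's own statement) =====
-- stated objective: alternative
-- what changed: Replaces the nested length/itertools.product loops with a single loop that decodes each ordinal i directly into its bijective base-26 lowercase suffix (prepending chr(97 + i % 26), i = i // 26 - 1), stopping when the suffix outgrows max_len - len(prefix) or n names were yielded.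
import Mathlib
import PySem

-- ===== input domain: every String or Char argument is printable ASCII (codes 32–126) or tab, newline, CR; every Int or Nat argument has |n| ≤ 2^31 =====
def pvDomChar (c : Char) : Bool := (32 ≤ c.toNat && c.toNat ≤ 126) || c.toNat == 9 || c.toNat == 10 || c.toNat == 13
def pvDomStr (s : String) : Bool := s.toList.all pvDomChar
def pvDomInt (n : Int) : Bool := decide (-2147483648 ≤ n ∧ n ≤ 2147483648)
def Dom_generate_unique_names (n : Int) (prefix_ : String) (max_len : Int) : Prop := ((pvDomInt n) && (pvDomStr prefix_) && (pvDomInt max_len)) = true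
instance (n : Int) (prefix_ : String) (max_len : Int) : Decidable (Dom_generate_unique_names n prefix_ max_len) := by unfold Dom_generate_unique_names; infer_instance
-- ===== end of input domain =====

-- B replaces A's nested length/product loops by decoding each ordinal i directly into its
-- bijective base-26 suffix (alternative decomposition; the generators' emitted lists are proved equal).

-- ===== PORT A =====
-- string.ascii_lowercase
def pvCharset : List Char := "abcdefghijklmnopqrstuvwxyz".toList

-- itertools.product(cs, repeat=k), each tuple as a List Char (first coordinate varies slowest)
def pvProd (cs : List Char) : Nat → List (List Char)
  | 0 => [[]]
  | k + 1 => cs.flatMap (fun c => (pvProd cs k).map (fun t => c :: t))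

-- the inner `for suffix in product(...)` loop: yields names, counts, early-returns when count >= n;
-- returns (yielded names, final count, whether `return` fired)
def pvEmit (prefix_ : String) (n : Int) : Int → List (List Char) → List String × Int × Bool
  | count, [] => ([], count, false)
  | count, s :: rest =>
    let name := prefix_ ++ String.mk s
    let count' := count + 1
    if count' ≥ n then ([name], count', true)
    else
      let r := pvEmit prefix_ n count' rest
      (name :: r.1, r.2.1, r.2.2)

-- the outer `for length in range(1, usable_len + 1)` loop
def pvLenLoop (prefix_ : String) (n : Int) (cs : List Char) : Int → List Int → List String
  | _, [] => []
  | count, L :: Ls =>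
    let r := pvEmit prefix_ n count (pvProd cs L.toNat)
    if r.2.2 then r.1 else r.1 ++ pvLenLoop prefix_ n cs r.2.1 Ls

def generate_unique_names (n : Int) (prefix_ : String) (max_len : Int) : List String :=
  let usable_len := max_len - PySem.Str.len prefix_
  pvLenLoop prefix_ n pvCharset 0 (PySem.List.pyRange 1 (usable_len + 1) 1)

-- ===== PORT B =====
-- termination helper for pvDecode (cited by its decreasing_by)
theorem pvDecode_step {j : Int} (h : ¬ PySem.Int.floordiv j 26 - 1 < 0) :
    (PySem.Int.floordiv j 26 - 1).toNat < j.toNat := by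
  rw [PySem.Int.floordiv_eq_ediv_of_pos (by norm_num)] at *
  omega

-- the inner `while True` decode loop of B: prepend chr(97 + j % 26), j = j // 26 - 1, stop when j < 0
def pvDecode (j : Int) (suffix : List Char) : List Char :=
  let suffix' := Char.ofNat (97 + (PySem.Int.mod j 26).toNat) :: suffix
  if h : PySem.Int.floordiv j 26 - 1 < 0 then suffix'
  else pvDecode (PySem.Int.floordiv j 26 - 1) suffix'
termination_by j.toNat
decreasing_by exact pvDecode_step h

-- the outer `while True` loop of B (states: count, i); len(suffix) is the char-list length (exact)
def pvBLoop (n : Int) (prefix_ : String) (usable_len : Int) (count i : Int) : List String :=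
  let suffix := pvDecode i []
  if (suffix.length : Int) > usable_len then []
  else
    let count' := count + 1
    if count' ≥ n then [prefix_ ++ String.mk suffix]
    else (prefix_ ++ String.mk suffix) :: pvBLoop n prefix_ usable_len count' (i + 1)
termination_by (n - count).toNat
decreasing_by omega

def generate_unique_names_alt (n : Int) (prefix_ : String) (max_len : Int) : List String :=
  let usable_len := max_len - PySem.Str.len prefix_
  pvBLoop n prefix_ usable_len 0 0

-- ===== PRECONDITION & SPEC =====
def Spec_generate_unique_names (n : Int) (prefix_ : String) (max_len : Int) (out : List String) : Prop := out = generate_unique_names_alt n prefix_ max_len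
instance (n : Int) (prefix_ : String) (max_len : Int) (out : List String) : Decidable (Spec_generate_unique_names n prefix_ max_len out) := by unfold Spec_generate_unique_names; infer_instance

-- ===== CLAIM (what is proved, stated in full; the proofs are below) =====
def Claim_equal_generate_unique_names : Prop := ∀ (n : Int) (prefix_ : String) (max_len : Int), Dom_generate_unique_names n prefix_ max_len → Spec_generate_unique_names n prefix_ max_len (generate_unique_names n prefix_ max_len)

-- ===== LEMMAS AND PROOFS =====

-- base-26 representation of k with exactly L digits, as lowercase chars
def pvRep : Nat → Nat → List Char
  | 0, _ => []
  | L + 1, k => pvRep L (k / 26) ++ [Char.ofNat (97 + k % 26)]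

-- number of nonempty lowercase strings of length ≤ L (= 26 + 26² + … + 26^L)
def pvT : Nat → Nat
  | 0 => 0
  | L + 1 => 26 * (pvT L + 1)

theorem pvT_succ (L : Nat) : pvT (L + 1) = pvT L + 26 ^ (L + 1) := by
  induction L with
  | zero => simp [pvT]
  | succ M ih => calc pvT (M + 2) = 26 * (pvT (M + 1) + 1) := rfl
        _ = 26 * (pvT M + 26 ^ (M + 1) + 1) := by rw [ih]
        _ = pvT (M + 1) + 26 ^ (M + 2) := by simp only [pvT, pow_succ]; ring

theorem pvRep_length (L k : Nat) : (pvRep L k).length = L := by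
  induction L generalizing k with
  | zero => rfl
  | succ M ih => simp [pvRep, ih]

theorem pvDecode_append (m : Nat) : ∀ (j : Int), j.toNat ≤ m → ∀ s t : List Char,
    pvDecode j (s ++ t) = pvDecode j s ++ t := by
  induction m with
  | zero =>
    intro j hj s t
    have h : PySem.Int.floordiv j 26 - 1 < 0 := by
      rw [PySem.Int.floordiv_eq_ediv_of_pos (by norm_num)]; omega
    rw [pvDecode]
    conv_rhs => rw [pvDecode]
    rw [dif_pos h, dif_pos h]
    rfl
  | succ m ih =>
    intro j hj s t
    rw [pvDecode]
    conv_rhs => rw [pvDecode]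
    by_cases h : PySem.Int.floordiv j 26 - 1 < 0
    · rw [dif_pos h, dif_pos h]; rfl
    · rw [dif_neg h, dif_neg h]
      have hstep := pvDecode_step h
      exact ih (PySem.Int.floordiv j 26 - 1) (by omega)
        (Char.ofNat (97 + (PySem.Int.mod j 26).toNat) :: s) t

theorem pvDecode_rep : ∀ (L k : Nat), k < 26 ^ (L + 1) →
    pvDecode ((pvT L + k : Nat) : Int) [] = pvRep (L + 1) k := by
  intro L
  induction L with
  | zero =>
    intro k hk
    rw [pvDecode]
    have h1 : PySem.Int.mod ((pvT 0 + k : Nat) : Int) 26 = ((k % 26 : Nat) : Int) := by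
      simp [pvT]
    have h2 : PySem.Int.floordiv ((pvT 0 + k : Nat) : Int) 26 - 1 < 0 := by
      have := PySem.Int.floordiv_natCast (pvT 0 + k) 26
      rw [show ((26:Nat):Int) = (26:Int) from rfl] at this
      rw [this]
      have : (pvT 0 + k) / 26 = 0 := by simp [pvT]; omega
      simp [this]
    simp only [h1, h2, dite_true, Int.toNat_natCast]
    simp [pvRep, pvT]
  | succ M ih =>
    intro k hk
    rw [pvDecode]
    have hN : pvT (M + 1) + k = 26 * (pvT M + 1) + k := by simp [pvT]
    have h1 : PySem.Int.mod ((pvT (M + 1) + k : Nat) : Int) 26 = ((k % 26 : Nat) : Int) := by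
      have := PySem.Int.mod_natCast (pvT (M + 1) + k) 26
      rw [show ((26:Nat):Int) = (26:Int) from rfl] at this
      rw [this]
      congr 1
      omega
    have h2 : PySem.Int.floordiv ((pvT (M + 1) + k : Nat) : Int) 26 = ((pvT M + 1 + k / 26 : Nat) : Int) := by
      have := PySem.Int.floordiv_natCast (pvT (M + 1) + k) 26
      rw [show ((26:Nat):Int) = (26:Int) from rfl] at this
      rw [this]
      congr 1
      omega
    have h3 : ¬ (PySem.Int.floordiv ((pvT (M + 1) + k : Nat) : Int) 26 - 1 < 0) := by
      rw [h2]; push_cast; omega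
    simp only [h1, h3, dite_false, Int.toNat_natCast]
    have h4 : PySem.Int.floordiv ((pvT (M + 1) + k : Nat) : Int) 26 - 1 = ((pvT M + k / 26 : Nat) : Int) := by
      rw [h2]; push_cast; omega
    rw [h4]
    have h5 : pvDecode ((pvT M + k / 26 : Nat) : Int) ([Char.ofNat (97 + k % 26)]) =
        pvDecode ((pvT M + k / 26 : Nat) : Int) [] ++ [Char.ofNat (97 + k % 26)] := by
      have := pvDecode_append ((pvT M + k / 26 : Nat) : Int).toNat
        ((pvT M + k / 26 : Nat) : Int) le_rfl [] [Char.ofNat (97 + k % 26)]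
      simpa using this
    have hdiv : k / 26 < 26 ^ (M + 1) := by
      have hp : (26 : Nat) ^ (M + 1 + 1) = 26 ^ (M + 1) * 26 := pow_succ 26 (M + 1)
      omega
    rw [h5, ih (k / 26) hdiv]
    rfl

theorem pvRep_succ_first (L k : Nat) (hk : k < 26 ^ (L + 1)) :
    pvRep (L + 1) k = Char.ofNat (97 + k / 26 ^ L) :: pvRep L (k % 26 ^ L) := by
  induction L generalizing k with
  | zero =>
    have hk' : k < 26 := by simpa using hk
    simp [pvRep, Nat.mod_eq_of_lt hk']
  | succ M ih =>
    show pvRep (M + 1) (k / 26) ++ [Char.ofNat (97 + k % 26)] = _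
    have hdiv : k / 26 < 26 ^ (M + 1) := by
      have hp : (26 : Nat) ^ (M + 1 + 1) = 26 ^ (M + 1) * 26 := pow_succ 26 (M + 1)
      omega
    rw [ih (k / 26) hdiv]
    have e1 : k / 26 / 26 ^ M = k / 26 ^ (M + 1) := by
      rw [Nat.div_div_eq_div_mul, pow_succ, mul_comm]
    have e2 : k / 26 % 26 ^ M = k % 26 ^ (M + 1) / 26 := by
      rw [← Nat.mod_mul_right_div_self, ← pow_succ']
    have e3 : k % 26 = k % 26 ^ (M + 1) % 26 := by
      rw [Nat.mod_mod_of_dvd _ (dvd_pow_self 26 (Nat.succ_ne_zero M))]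
    rw [e1, e2, e3]
    rfl

theorem pvRange_mul_flatMap {α : Type} (a b : Nat) (f : Nat → α) :
    (List.range (a * b)).map f =
      (List.range a).flatMap (fun i => (List.range b).map (fun j => f (i * b + j))) := by
  induction a with
  | zero => simp
  | succ a ih =>
    rw [Nat.succ_mul, List.range_add, List.range_succ]
    simp [ih, List.map_map, Function.comp_def]

theorem pvCharset_eq : pvCharset = (List.range 26).map (fun d => Char.ofNat (97 + d)) := by decide

theorem pvProd_eq (L : Nat) : pvProd pvCharset L = (List.range (26 ^ L)).map (pvRep L) := by
  induction L with
  | zero => rfl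
  | succ M ih =>
    have step : (26 : Nat) ^ (M + 1) = 26 * 26 ^ M := by rw [pow_succ, mul_comm]
    rw [step, pvRange_mul_flatMap 26 (26 ^ M) (pvRep (M + 1))]
    show pvCharset.flatMap (fun c => (pvProd pvCharset M).map (fun t => c :: t)) = _
    rw [ih, pvCharset_eq, List.flatMap_map]
    apply List.flatMap_congr
    intro d hd
    rw [List.mem_range] at hd
    simp only [List.map_map, Function.comp_def]
    apply List.map_congr_left
    intro r hr
    rw [List.mem_range] at hr
    rw [pvRep_succ_first M (d * 26 ^ M + r)
      (by have : 26 ^ (M + 1) = 26 * 26 ^ M := step; nlinarith)]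
    have e1 : (26 ^ M * d + r) / 26 ^ M = d := by
      rw [Nat.mul_add_div (by positivity), Nat.div_eq_of_lt hr, Nat.add_zero]
    have e2 : (26 ^ M * d + r) % 26 ^ M = r := by
      rw [Nat.mul_add_mod, Nat.mod_eq_of_lt hr]
    rw [Nat.mul_comm d (26 ^ M), e1, e2]

theorem pvEmit_count (prefix_ : String) (n : Int) :
    ∀ (xs : List (List Char)) (c : Int), (pvEmit prefix_ n c xs).2.2 = false →
      (pvEmit prefix_ n c xs).2.1 = c + xs.length := by
  intro xs
  induction xs with
  | nil => intro c _; simp [pvEmit]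
  | cons x rest ih =>
    intro c h
    rw [pvEmit] at h ⊢
    by_cases hc : c + 1 ≥ n
    · simp [hc] at h
    · simp only [hc, if_false] at h ⊢
      rw [ih _ h]
      push_cast [List.length_cons]
      omega

theorem pvBLoop_blocks (n : Int) (p : String) (u : Int) :
    ∀ (xs : List (List Char)) (c : Int) (i : Nat),
      (∀ j (hj : j < xs.length), pvDecode ((i + j : Nat) : Int) [] = xs[j] ∧ ((xs[j].length : Int) ≤ u)) →
      pvBLoop n p u c i =
        (pvEmit p n c xs).1 ++
          (if (pvEmit p n c xs).2.2 then [] else pvBLoop n p u (c + xs.length) ((i + xs.length : Nat) : Int)) := by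
  intro xs
  induction xs with
  | nil => intro c i _; simp [pvEmit]
  | cons x rest ih =>
    intro c i h
    have h0 := h 0 (by simp)
    rw [pvBLoop]
    simp only [Nat.add_zero, List.getElem_cons_zero] at h0
    rw [h0.1]
    have hle : ¬ ((x.length : Int) > u) := by omega
    simp only [hle, if_false]
    rw [pvEmit]
    by_cases hc : c + 1 ≥ n
    · simp [hc]
    · simp only [hc, if_false, ge_iff_le, not_le] at *
      have hrec := ih (c + 1) (i + 1) (by
        intro j hj
        have := h (j + 1) (by simpa using Nat.succ_lt_succ hj)
        simpa [Nat.add_assoc, Nat.add_comm 1 j] using this)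
      have ei : ((i : Nat) : Int) + 1 = ((i + 1 : Nat) : Int) := by push_cast; ring
      rw [ei, hrec]
      have ec : c + 1 + (rest.length : Int) = c + ((x :: rest).length : Int) := by
        simp; ring
      have eidx : ((i + 1 + rest.length : Nat) : Int) = ((i + (x :: rest).length : Nat) : Int) := by
        simp; push_cast; ring
      rw [ec, eidx]
      simp

theorem pvMain (p : String) (n u : Int) :
    ∀ (d M : Nat) (c : Int), (u + 1 - ((M : Int) + 1)).toNat = d →
      pvLenLoop p n pvCharset c (PySem.List.pyRange ((M : Int) + 1) (u + 1) 1) =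
        pvBLoop n p u c ((pvT M : Nat) : Int) := by
  intro d
  induction d with
  | zero =>
    intro M c hd
    have hMu : u < (M : Int) + 1 := by omega
    have hr : PySem.List.pyRange ((M : Int) + 1) (u + 1) 1 = [] := by
      rw [PySem.List.pyRange_one, hd]
      rfl
    rw [hr, pvLenLoop, pvBLoop]
    have hdec : pvDecode ((pvT M + 0 : Nat) : Int) [] = pvRep (M + 1) 0 :=
      pvDecode_rep M 0 (by positivity)
    simp only [Nat.add_zero] at hdec
    rw [hdec]
    have : ((pvRep (M + 1) 0).length : Int) > u := by
      rw [pvRep_length]; push_cast; omega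
    simp [this]
  | succ d ih =>
    intro M c hd
    have hMu : (M : Int) + 1 < u + 1 := by omega
    rw [PySem.List.pyRange_one_cons hMu, pvLenLoop]
    have htn : ((M : Int) + 1).toNat = M + 1 := by omega
    rw [htn, pvProd_eq (M + 1)]
    set xs := (List.range (26 ^ (M + 1))).map (pvRep (M + 1)) with hxs
    have hlen : xs.length = 26 ^ (M + 1) := by simp [hxs]
    have hblocks := pvBLoop_blocks n p u xs c (pvT M) (by
      intro j hj
      rw [hlen] at hj
      constructor
      · rw [pvDecode_rep M j hj]
        simp [hxs, hj]
      · simp only [hxs, List.getElem_map, List.getElem_range, pvRep_length]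
        push_cast; omega)
    rw [hblocks]
    by_cases hs : (pvEmit p n c xs).2.2
    · simp [hs]
    · simp only [hs, if_false, Bool.false_eq_true, if_neg, pvEmit_count p n xs c (by simpa using hs)]
      have hT : pvT M + xs.length = pvT (M + 1) := by
        rw [hlen, pvT_succ]
      rw [hT]
      have := ih (M + 1) (c + (xs.length : Int)) (by push_cast; omega)
      rw [show ((M + 1 : Nat) : Int) + 1 = ((M : Int) + 1) + 1 by push_cast; ring] at this
      rw [← this]

-- ===== VERDICT (by name: the statement is the Claim_ definition above) =====
theorem generate_unique_names_spec : Claim_equal_generate_unique_names := by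
  intro n prefix_ max_len _
  unfold Spec_generate_unique_names generate_unique_names generate_unique_names_alt
  have h := pvMain prefix_ n (max_len - PySem.Str.len prefix_)
    ((max_len - PySem.Str.len prefix_ + 1 - ((0 : Int) + 1)).toNat) 0 0 rfl
  simpa [pvT] using h
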